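-- pv_equiv track=rewrite | github.com/joshanashakya/dissertation | workspace/dataset/java-python/GeeksForGeeks/1067/A/2.py | LedRequired
-- ===== SOURCE A (Python) =====
-- seg = [ 6, 2, 5, 5, 4,
--         5, 6, 3, 7, 6 ]
--
-- def LedRequired(s, led) :
--
--     count = 0
--
--     # Finding sum of the segments used
--     # by each digit of the number
--     for i in range(len(s)) :
--         count += seg[ord(s[i]) - 48]
--
--     if (count <= led) :
--         return "YES"
--     else :
--         return "NO"
-- ===== SOURCE B (Python) =====
-- seg = [ 6, 2, 5, 5, 4,
--         5, 6, 3, 7, 6 ]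
--
-- def LedRequired(s, led):
--     # Tabulate character frequencies once, then take a weighted sum over
--     # the distinct characters (same unguarded seg indexing as the original).
--     freq = {}
--     for ch in s:
--         freq[ch] = freq.get(ch, 0) + 1
--     count = sum(seg[ord(ch) - 48] * n for ch, n in freq.items())
--     return "YES" if count <= led else "NO"
-- ===== Notes on version B (the rewrite author's own statement) =====
-- stated objective: alternative
-- what changed: B builds a frequency table of the characters in one pass and computes the total as a weighted sum seg-cost(ch)*count over distinct characters, instead of A's per-index accumulation over the whole string.
import Mathlib
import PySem

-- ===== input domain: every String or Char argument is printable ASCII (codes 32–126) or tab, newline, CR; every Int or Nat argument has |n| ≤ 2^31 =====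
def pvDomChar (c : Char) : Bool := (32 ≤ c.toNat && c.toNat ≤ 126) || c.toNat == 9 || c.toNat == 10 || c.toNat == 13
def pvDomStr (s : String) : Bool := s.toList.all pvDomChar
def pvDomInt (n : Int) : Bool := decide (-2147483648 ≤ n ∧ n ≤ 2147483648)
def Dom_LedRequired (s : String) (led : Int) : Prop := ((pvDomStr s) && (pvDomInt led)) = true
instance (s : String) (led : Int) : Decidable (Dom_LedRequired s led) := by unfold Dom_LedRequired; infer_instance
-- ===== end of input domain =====

-- B replaces A's per-index accumulation by a frequency table plus a weighted sum
-- over distinct characters (objective: alternative decomposition, same cost).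

-- the module-level table seg
def segList : List Int := [6, 2, 5, 5, 4, 5, 6, 3, 7, 6]

-- ===== PORT A =====
-- for i in range(len(s)): count += seg[ord(s[i]) - 48]   (pyGetD is exact under Pre_)
def LedRequired (s : String) (led : Int) : String :=
  let cs := s.toList
  let count := (PySem.List.pyRange 0 (cs.length : Int) 1).foldl
    (fun count i =>
      count + PySem.List.pyGetD segList (((PySem.List.pyGetD cs i ' ').toNat : Int) - 48) 0) 0
  if count ≤ led then "YES" else "NO"

-- ===== PORT B =====
-- freq = {}; for ch in s: freq[ch] = freq.get(ch, 0) + 1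
-- count = sum(seg[ord(ch) - 48] * n for ch, n in freq.items())
def LedRequired_alt (s : String) (led : Int) : String :=
  let freq := s.toList.foldl (fun d ch => d.insert ch (d.getD ch 0 + 1))
    (PySem.Dict.empty : PySem.Dict Char Int)
  let count := (freq.items.map
    (fun p => PySem.List.pyGetD segList ((p.1.toNat : Int) - 48) 0 * p.2)).sum
  if count ≤ led then "YES" else "NO"

-- ===== PRECONDITION & SPEC =====
-- Pre_ excludes exactly the inputs on which A raises IndexError: a character whose
-- code is below 38 or above 57 makes ord(ch)-48 fall outside [-10, 9], i.e. outside
-- the 10-element seg list even after Python's negative-index wraparound.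
def Pre_LedRequired (s : String) (led : Int) : Prop :=
  s.toList.all (fun c => 38 ≤ c.toNat && c.toNat ≤ 57) = true
instance (s : String) (led : Int) : Decidable (Pre_LedRequired s led) := by
  unfold Pre_LedRequired; infer_instance
def pvWitness_LedRequired : String × Int := ("1234", 20)

def Spec_LedRequired (s : String) (led : Int) (out : String) : Prop := out = LedRequired_alt s led
instance (s : String) (led : Int) (out : String) : Decidable (Spec_LedRequired s led out) := by unfold Spec_LedRequired; infer_instance

-- ===== CLAIM (what is proved, stated in full; the proofs are below) =====
def Claim_equal_LedRequired : Prop := ∀ (s : String) (led : Int), Dom_LedRequired s led → Pre_LedRequired s led → Spec_LedRequired s led (LedRequired s led)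

-- ===== LEMMAS AND PROOFS =====

-- the weight of one character
def segW (c : Char) : Int := PySem.List.pyGetD segList ((c.toNat : Int) - 48) 0

-- weighted sum over the distinct elements = plain sum over the list
theorem toFinset_ofList (cs : List Char) :
    (PySem.Set.ofList cs : List Char).toFinset = cs.toFinset := by
  ext x; simp [PySem.Set.mem_ofList]

theorem weighted_sum_dedup (cs : List Char) :
    ((PySem.Set.ofList cs).map (fun k => segW k * (List.count k cs : Int))).sum
      = (cs.map segW).sum := by
  rw [← List.sum_toFinset _ (PySem.Set.nodup_ofList cs), toFinset_ofList,
    Finset.sum_list_map_count]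
  refine Finset.sum_congr rfl (fun m _ => ?_)
  simp [mul_comm]

theorem LedRequired_spec : Claim_equal_LedRequired := by
  intro s led _ _
  unfold Spec_LedRequired LedRequired LedRequired_alt
  simp only [PySem.Dict.foldl_insert_getD_add_one_eq_counter, PySem.Dict.items_counter,
    List.map_map,
    PySem.List.foldl_pyRange_zero_pyGetD' s.toList ' '
      (fun acc c => acc + PySem.List.pyGetD segList ((c.toNat : Int) - 48) 0) 0,
    PySem.List.foldl_add (fun c => PySem.List.pyGetD segList ((c.toNat : Int) - 48) 0)]
  have h := weighted_sum_dedup s.toList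
  have hA := PySem.List.foldl_add s.toList segW 0
  simp only [segW] at h hA
  simp only [Function.comp_def]
  rw [hA]; simp only [h, zero_add]
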